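-- pv_equiv track=rewrite | github.com/Dai0-2/Paper_Reach | paper_reach/ranking/rubric.py | _score_outcome_match
-- ===== SOURCE A (Python) =====
-- def _score_outcome_match(text: str) -> int:
--     if any(term in text for term in ["population exposure", "affected population", "population at risk", "exposure risk"]):
--         return 3
--     if any(term in text for term in ["risk assessment", "exposure assessment", "at risk"]):
--         return 2
--     if any(term in text for term in ["vulnerability", "risk", "exposure"]):
--         return 1
--     return 0
-- ===== SOURCE B (Python) =====
-- _TIER_SCORES = {
--     "population exposure": 3,
--     "affected population": 3,
--     "population at risk": 3,
--     "exposure risk": 3,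
--     "risk assessment": 2,
--     "exposure assessment": 2,
--     "at risk": 2,
--     "vulnerability": 1,
--     "risk": 1,
--     "exposure": 1,
-- }
--
--
-- def _score_outcome_match(text: str) -> int:
--     return max((score for phrase, score in _TIER_SCORES.items() if phrase in text), default=0)
-- ===== Notes on version B (the rewrite author's own statement) =====
-- stated objective: simpler
-- what changed: Replaced the three ordered any(...) guards with early returns by one flat phrase-to-score table and a single max over the matching phrases (default 0).
import Mathlib
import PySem

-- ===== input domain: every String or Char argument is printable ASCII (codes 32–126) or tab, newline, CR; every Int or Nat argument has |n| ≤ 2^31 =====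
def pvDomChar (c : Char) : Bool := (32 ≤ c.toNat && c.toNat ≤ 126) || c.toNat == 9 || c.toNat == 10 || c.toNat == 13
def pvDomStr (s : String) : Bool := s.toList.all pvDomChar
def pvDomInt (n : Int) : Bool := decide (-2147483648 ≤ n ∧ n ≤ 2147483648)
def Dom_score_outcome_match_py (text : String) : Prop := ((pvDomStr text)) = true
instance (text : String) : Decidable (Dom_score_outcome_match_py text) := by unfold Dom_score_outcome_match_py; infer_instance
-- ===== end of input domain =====

-- B replaces A's three ordered any(...) guards by one flat phrase→score table and a
-- single max over the matching phrases (objective: simpler).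

-- ===== PORT A =====
def score_outcome_match_py (text : String) : Int :=
  if ["population exposure", "affected population", "population at risk", "exposure risk"].any
      (fun term => PySem.Str.isIn term text) then 3
  else if ["risk assessment", "exposure assessment", "at risk"].any
      (fun term => PySem.Str.isIn term text) then 2
  else if ["vulnerability", "risk", "exposure"].any
      (fun term => PySem.Str.isIn term text) then 1
  else 0

-- ===== PORT B =====
def pvTierScores : List (String × Int) :=
  [("population exposure", 3), ("affected population", 3), ("population at risk", 3),
   ("exposure risk", 3), ("risk assessment", 2), ("exposure assessment", 2), ("at risk", 2),
   ("vulnerability", 1), ("risk", 1), ("exposure", 1)]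

def score_outcome_match_py_alt (text : String) : Int :=
  (PySem.List.max?
      ((pvTierScores.filter (fun kv => PySem.Str.isIn kv.1 text)).map (fun kv => kv.2))
      (fun s => s)).getD 0

-- ===== PRECONDITION & SPEC =====
def Spec_score_outcome_match_py (text : String) (out : Int) : Prop := out = score_outcome_match_py_alt text
instance (text : String) (out : Int) : Decidable (Spec_score_outcome_match_py text out) := by unfold Spec_score_outcome_match_py; infer_instance

-- ===== CLAIM (what is proved, stated in full; the proofs are below) =====
def Claim_equal_score_outcome_match_py : Prop := ∀ (text : String), Dom_score_outcome_match_py text → Spec_score_outcome_match_py text (score_outcome_match_py text)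

-- ===== LEMMAS AND PROOFS =====

-- max(L, default=0) equals s when s is a member and an upper bound of L
lemma pvMaxOf (L : List Int) (s : Int) (hs : s ∈ L) (hub : ∀ y ∈ L, y ≤ s) :
    (PySem.List.max? L (fun x => x)).getD 0 = s := by
  cases hL : PySem.List.max? L (fun x => x) with
  | none =>
    rw [PySem.List.max?_eq_none_iff] at hL
    subst hL; cases hs
  | some m =>
    have hm := PySem.List.max?_mem hL
    have h1 := PySem.List.max?_isMax hL s hs
    simpa using le_antisymm (hub m hm) h1

-- ===== VERDICT (by name: the statement is the Claim_ definition above) =====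
theorem score_outcome_match_py_spec : Claim_equal_score_outcome_match_py := by
  intro text _
  unfold Spec_score_outcome_match_py score_outcome_match_py score_outcome_match_py_alt
  simp only [List.any_cons, List.any_nil, Bool.or_false, Bool.or_eq_true]
  have hmem : ∀ y : Int, y ∈ (pvTierScores.filter
      (fun kv => PySem.Str.isIn kv.1 text)).map (fun kv => kv.2) ↔
      ∃ kv ∈ pvTierScores, PySem.Str.isIn kv.1 text = true ∧ kv.2 = y := by
    intro y
    simp [List.mem_map, List.mem_filter]
  split_ifs with hA hB hC
  · -- a tier-3 phrase matches
    refine (pvMaxOf _ 3 ?_ ?_).symm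
    · rw [hmem]
      rcases hA with h | h | h | h
      · exact ⟨("population exposure", 3), by simp [pvTierScores], h, rfl⟩
      · exact ⟨("affected population", 3), by simp [pvTierScores], h, rfl⟩
      · exact ⟨("population at risk", 3), by simp [pvTierScores], h, rfl⟩
      · exact ⟨("exposure risk", 3), by simp [pvTierScores], h, rfl⟩
    · intro y hy
      rw [hmem] at hy
      obtain ⟨kv, hkv, _, hy⟩ := hy
      simp [pvTierScores] at hkv
      rcases hkv with h|h|h|h|h|h|h|h|h|h <;> subst h <;> omega
  · -- no tier-3 phrase, a tier-2 phrase matches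
    simp only [not_or, Bool.not_eq_true] at hA
    obtain ⟨hA1, hA2, hA3, hA4⟩ := hA
    refine (pvMaxOf _ 2 ?_ ?_).symm
    · rw [hmem]
      rcases hB with h | h | h
      · exact ⟨("risk assessment", 2), by simp [pvTierScores], h, rfl⟩
      · exact ⟨("exposure assessment", 2), by simp [pvTierScores], h, rfl⟩
      · exact ⟨("at risk", 2), by simp [pvTierScores], h, rfl⟩
    · intro y hy
      rw [hmem] at hy
      obtain ⟨kv, hkv, hin, hy⟩ := hy
      simp [pvTierScores] at hkv
      rcases hkv with h|h|h|h|h|h|h|h|h|h <;> subst h <;>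
        simp_all <;> omega
  · -- only a tier-1 phrase matches
    simp only [not_or, Bool.not_eq_true] at hA hB
    obtain ⟨hA1, hA2, hA3, hA4⟩ := hA
    obtain ⟨hB1, hB2, hB3⟩ := hB
    refine (pvMaxOf _ 1 ?_ ?_).symm
    · rw [hmem]
      rcases hC with h | h | h
      · exact ⟨("vulnerability", 1), by simp [pvTierScores], h, rfl⟩
      · exact ⟨("risk", 1), by simp [pvTierScores], h, rfl⟩
      · exact ⟨("exposure", 1), by simp [pvTierScores], h, rfl⟩
    · intro y hy
      rw [hmem] at hy
      obtain ⟨kv, hkv, hin, hy⟩ := hy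
      simp [pvTierScores] at hkv
      rcases hkv with h|h|h|h|h|h|h|h|h|h <;> subst h <;> simp_all
  · -- nothing matches: the filtered list is empty
    simp only [not_or, Bool.not_eq_true] at hA hB hC
    obtain ⟨hA1, hA2, hA3, hA4⟩ := hA
    obtain ⟨hB1, hB2, hB3⟩ := hB
    obtain ⟨hC1, hC2, hC3⟩ := hC
    have hnil : (pvTierScores.filter
        (fun kv => PySem.Str.isIn kv.1 text)).map (fun kv => kv.2) = [] := by
      simp only [pvTierScores, List.filter_cons, hA1, hA2, hA3, hA4, hB1, hB2, hB3,
        hC1, hC2, hC3, Bool.false_eq_true, if_false, List.filter_nil, List.map_nil]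
    rw [hnil]
    rfl
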